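-- pv_equiv track=rewrite | github.com/lukasellinger/ellngr-tools-api | app/core/factVerification/general_utils/utils.py | generate_case_combinations
-- ===== SOURCE A (Python) =====
-- import itertools
--
-- def generate_case_combinations(txt: str) -> list[str]:
--     """
--     Generates all combinations of uppercase and lowercase for the first letter of each word in
--     a string.
--
--     :param txt: The input string.
--     :return: A list of all case variations for the input text.
--     """
--     words = txt.split()
--     combinations = []
--
--     # Generate all combinations of upper and lower case for the first letter of each word
--     for case_pattern in itertools.product(*[(word[0].lower(), word[0].upper()) for word in words]):
--         # Reconstruct the sentence with the current case pattern
--         combination = " ".join(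
--             pattern + word[1:] for pattern, word in zip(case_pattern, words)
--         )
--         combinations.append(combination)
--
--     return combinations
-- ===== SOURCE B (Python) =====
-- def generate_case_combinations(txt: str) -> list[str]:
--     """All lower/upper variations of the first letter of each word, by structural
--     recursion on the word list: combine both variants of the first word with the
--     recursively built suffix sentences (tails are shared between the two halves)."""
--     def go(words):
--         if not words:
--             return [""]
--         w, rest = words[0], words[1:]
--         tails = go(rest)
--         lw = w[0].lower() + w[1:]
--         uw = w[0].upper() + w[1:]
--         if rest:
--             return [lw + " " + t for t in tails] + [uw + " " + t for t in tails]
--         return [lw, uw]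
--     return go(txt.split())
-- ===== Notes on version B (the rewrite author's own statement) =====
-- stated objective: alternative
-- what changed: Replaces the itertools.product over per-word (lower, upper) first-letter tuples plus zip/join reconstruction by a structural recursion on the word list that builds the complete suffix sentences directly, combining both variants of the head word with the shared recursively built tails; no pattern tuples, zip or join remain.
import Mathlib
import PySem

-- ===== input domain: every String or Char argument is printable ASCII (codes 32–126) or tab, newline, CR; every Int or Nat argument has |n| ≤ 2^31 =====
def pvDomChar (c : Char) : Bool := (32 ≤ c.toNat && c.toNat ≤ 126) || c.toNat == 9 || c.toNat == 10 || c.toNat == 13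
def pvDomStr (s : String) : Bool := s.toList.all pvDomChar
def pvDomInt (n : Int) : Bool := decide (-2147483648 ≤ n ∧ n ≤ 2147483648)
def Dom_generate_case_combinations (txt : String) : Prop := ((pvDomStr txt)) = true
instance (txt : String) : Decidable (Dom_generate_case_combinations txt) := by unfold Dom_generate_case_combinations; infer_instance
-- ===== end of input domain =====

-- B replaces A's itertools.product over per-word (lower, upper) first-letter tuples plus
-- zip/join reconstruction by a structural recursion on the word list that builds the complete
-- suffix sentences directly (objective: alternative; same exponential output size).

-- ===== PORT A =====
-- word[0] as a one-character string; split() words are nonempty, so the none branch is unreachable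
def pvChar0 (w : List Char) : List Char :=
  match PySem.List.pyGet? w 0 with
  | some c => [c]
  | none => []

-- itertools.product over the list of (lower, upper) pools, first pool varying slowest
def pvProdA : List (List Char × List Char) → List (List (List Char))
  | [] => [[]]
  | p :: rest => [p.1, p.2].flatMap (fun x => (pvProdA rest).map (x :: ·))

def generate_case_combinations (txt : String) : List String :=
  let words := PySem.Chars.split₀ txt.toList
  let pairs := words.map (fun w => (PySem.Chars.lower (pvChar0 w), PySem.Chars.upper (pvChar0 w)))
  (pvProdA pairs).map (fun pat =>
    String.ofList (PySem.Chars.join [' ']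
      ((pat.zip words).map (fun pw => pw.1 ++ PySem.List.slice pw.2 (some 1) none))))

-- ===== PORT B =====
-- the inner recursive helper `go` of Source B
def pvGoB : List (List Char) → List (List Char)
  | [] => [[]]
  | w :: rest =>
    let tails := pvGoB rest
    let lw := PySem.Chars.lower (pvChar0 w) ++ PySem.List.slice w (some 1) none
    let uw := PySem.Chars.upper (pvChar0 w) ++ PySem.List.slice w (some 1) none
    match rest with
    | _ :: _ => tails.map (fun t => lw ++ [' '] ++ t) ++ tails.map (fun t => uw ++ [' '] ++ t)
    | [] => [lw, uw]

def generate_case_combinations_alt (txt : String) : List String :=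
  (pvGoB (PySem.Chars.split₀ txt.toList)).map String.ofList

-- ===== PRECONDITION & SPEC =====
def Spec_generate_case_combinations (txt : String) (out : List String) : Prop := out = generate_case_combinations_alt txt
instance (txt : String) (out : List String) : Decidable (Spec_generate_case_combinations txt out) := by unfold Spec_generate_case_combinations; infer_instance

-- ===== CLAIM (what is proved, stated in full; the proofs are below) =====
def Claim_equal_generate_case_combinations : Prop := ∀ (txt : String), Dom_generate_case_combinations txt → Spec_generate_case_combinations txt (generate_case_combinations txt)

-- ===== LEMMAS AND PROOFS =====

def pvLow (w : List Char) : List Char := PySem.Chars.lower (pvChar0 w)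
def pvUp (w : List Char) : List Char := PySem.Chars.upper (pvChar0 w)
def pvPairs (ws : List (List Char)) : List (List Char × List Char) :=
  ws.map (fun w => (pvLow w, pvUp w))

lemma pvJoin_cons_cons (a b : List Char) (l : List (List Char)) :
    PySem.Chars.join [' '] (a :: b :: l) = a ++ [' '] ++ PySem.Chars.join [' '] (b :: l) := by
  simp [PySem.Chars.join, List.intercalate, List.intersperse]

lemma pvProdA_cons (p : List Char × List Char) (rest : List (List Char × List Char)) :
    pvProdA (p :: rest) = (pvProdA rest).map (p.1 :: ·) ++ (pvProdA rest).map (p.2 :: ·) := by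
  conv_lhs => rw [pvProdA]
  simp

lemma pvGoB_cons_nil (w : List Char) :
    pvGoB [w] = [pvLow w ++ w.tail, pvUp w ++ w.tail] := by
  simp [pvGoB, pvLow, pvUp, PySem.List.slice_from_one]

lemma pvGoB_cons_cons (w w' : List Char) (t' : List (List Char)) :
    pvGoB (w :: w' :: t') =
      (pvGoB (w' :: t')).map (fun s => (pvLow w ++ w.tail) ++ [' '] ++ s) ++
      (pvGoB (w' :: t')).map (fun s => (pvUp w ++ w.tail) ++ [' '] ++ s) := by
  conv_lhs => rw [pvGoB]
  simp [pvLow, pvUp, PySem.List.slice_from_one]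

lemma pvProdA_length {ps : List (List Char × List Char)} {pat : List (List Char)}
    (h : pat ∈ pvProdA ps) : pat.length = ps.length := by
  induction ps generalizing pat with
  | nil => simp [pvProdA] at h; simp [h]
  | cons p rest ih =>
    simp only [pvProdA, List.mem_flatMap, List.mem_map] at h
    obtain ⟨x, _, pat', hmem, rfl⟩ := h
    simp [ih hmem]

lemma pvGo_eq (ws : List (List Char)) :
    pvGoB ws = (pvProdA (pvPairs ws)).map (fun pat =>
      PySem.Chars.join [' '] ((pat.zip ws).map (fun pw => pw.1 ++ pw.2.tail))) := by
  induction ws with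
  | nil => simp [pvGoB, pvPairs, pvProdA]
  | cons w t ih =>
    cases t with
    | nil =>
      simp [pvGoB_cons_nil, pvPairs, pvProdA, pvLow, pvUp]
    | cons w' t' =>
      have hmap : ∀ (x : List Char),
          (pvProdA (pvPairs (w' :: t'))).map (fun pat =>
              PySem.Chars.join [' ']
                (((x :: pat).zip (w :: w' :: t')).map (fun pw => pw.1 ++ pw.2.tail)))
            = (pvGoB (w' :: t')).map (fun s => (x ++ w.tail) ++ [' '] ++ s) := by
        intro x
        rw [ih, List.map_map]
        apply List.map_congr_left
        intro pat hpat
        have hlen : pat.length = (w' :: t').length := by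
          have := pvProdA_length hpat
          simpa [pvPairs] using this
        cases pat with
        | nil => simp at hlen
        | cons p ps =>
          simp [pvJoin_cons_cons, Function.comp]
      rw [show pvPairs (w :: w' :: t') = (pvLow w, pvUp w) :: pvPairs (w' :: t') from rfl,
        pvProdA_cons, List.map_append, List.map_map, List.map_map, pvGoB_cons_cons]
      simp only [Function.comp_def]
      rw [hmap (pvLow w), hmap (pvUp w)]

-- ===== VERDICT (by name: the statement is the Claim_ definition above) =====
theorem generate_case_combinations_spec : Claim_equal_generate_case_combinations := by
  intro txt _
  unfold Spec_generate_case_combinations generate_case_combinations generate_case_combinations_alt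
  rw [pvGo_eq, List.map_map]
  apply List.map_congr_left
  intro pat _
  simp [Function.comp, PySem.List.slice_from_one]
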